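-- pv_equiv track=rewrite | github.com/SepehrKazemian/APDataML | lumping_trad_allStates.py | mergePercentages
-- ===== SOURCE A (Python) =====
-- def mergePercentages(percentageMatrix, whole_subset):
--     start = 0
--     counter = 0
--     list_of_percentages = []
--     for i in range(1, len(whole_subset) - 1):
--         for j in range(start, len(percentageMatrix)):
--             start += 1
--             if percentageMatrix[j][2] == False:
--                 counter += 1
--                 if counter == whole_subset[i]:
--                     list_of_percentages.append((percentageMatrix[j][1]))
--                     break
--     return list_of_percentages
-- ===== SOURCE B (Python) =====
-- def mergePercentages(percentageMatrix, whole_subset):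
--     thresholds = whole_subset[1:-1]
--     ti = 0
--     counter = 0
--     out = []
--     for row in percentageMatrix:
--         if ti >= len(thresholds):
--             break
--         if row[2] == False:
--             counter += 1
--             if counter == thresholds[ti]:
--                 out.append(row[1])
--                 ti += 1
--     return out
-- ===== Notes on version B (the rewrite author's own statement) =====
-- stated objective: simpler
-- what changed: Replaces A's nested loops (one resumable, draining inner scan per threshold with a start cursor and break) by a single pass over percentageMatrix driven by a threshold pointer into whole_subset[1:-1].
import Mathlib
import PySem

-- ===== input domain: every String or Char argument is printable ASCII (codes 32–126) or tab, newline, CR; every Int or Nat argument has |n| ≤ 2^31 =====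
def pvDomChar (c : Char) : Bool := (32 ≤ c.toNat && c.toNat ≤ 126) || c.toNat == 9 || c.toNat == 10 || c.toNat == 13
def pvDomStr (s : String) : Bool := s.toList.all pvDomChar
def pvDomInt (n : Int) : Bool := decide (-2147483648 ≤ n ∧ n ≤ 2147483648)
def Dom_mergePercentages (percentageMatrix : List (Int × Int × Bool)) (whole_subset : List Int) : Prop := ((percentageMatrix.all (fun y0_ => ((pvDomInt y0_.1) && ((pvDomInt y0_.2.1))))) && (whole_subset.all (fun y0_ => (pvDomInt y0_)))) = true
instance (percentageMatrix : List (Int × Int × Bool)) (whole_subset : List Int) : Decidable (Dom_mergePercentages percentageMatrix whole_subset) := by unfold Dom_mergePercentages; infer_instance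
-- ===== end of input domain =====

-- B replaces A's nested loops (one resumable draining inner scan per threshold) with a
-- single pass over percentageMatrix driven by a threshold pointer (objective: simpler).

-- ===== PORT A =====
-- A's inner 'for j in range(start, len(percentageMatrix))' loop with its break;
-- returns the new (start, counter, list_of_percentages)
def mergeInnerA (pm : List (Int × Int × Bool)) (wsi : Int) (j : Nat) (counter : Int)
    (acc : List Int) : Nat × Int × List Int :=
  if h : j < pm.length then
    let row := pm[j]
    if row.2.2 = false then
      let counter := counter + 1
      if counter = wsi then (j + 1, counter, acc ++ [row.2.1])
      else mergeInnerA pm wsi (j + 1) counter acc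
    else mergeInnerA pm wsi (j + 1) counter acc
  else (j, counter, acc)
termination_by pm.length - j

def mergePercentages (percentageMatrix : List (Int × Int × Bool)) (whole_subset : List Int) : List Int :=
  let st :=
    (PySem.List.pyRange 1 ((whole_subset.length : Int) - 1) 1).foldl
      (fun st i =>
        mergeInnerA percentageMatrix (PySem.List.pyGetD whole_subset i 0) st.1 st.2.1 st.2.2)
      (0, 0, [])
  st.2.2

-- ===== PORT B =====
-- B's single pass over percentageMatrix; ti is the index into thresholds
def mergeGoB (thr : List Int) : List (Int × Int × Bool) → Nat → Int → List Int → List Int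
  | [], _, _, out => out
  | row :: rest, ti, counter, out =>
    if thr.length ≤ ti then out
    else if row.2.2 = false then
      let counter := counter + 1
      if counter = thr.getD ti 0 then mergeGoB thr rest (ti + 1) counter (out ++ [row.2.1])
      else mergeGoB thr rest ti counter out
    else mergeGoB thr rest ti counter out

def mergePercentages_alt (percentageMatrix : List (Int × Int × Bool)) (whole_subset : List Int) : List Int :=
  let thresholds := PySem.List.slice whole_subset (some 1) (some (-1))
  mergeGoB thresholds percentageMatrix 0 0 []

-- ===== PRECONDITION & SPEC =====
def Spec_mergePercentages (percentageMatrix : List (Int × Int × Bool)) (whole_subset : List Int) (out : List Int) : Prop := out = mergePercentages_alt percentageMatrix whole_subset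
instance (percentageMatrix : List (Int × Int × Bool)) (whole_subset : List Int) (out : List Int) : Decidable (Spec_mergePercentages percentageMatrix whole_subset out) := by unfold Spec_mergePercentages; infer_instance

-- ===== CLAIM (what is proved, stated in full; the proofs are below) =====
def Claim_equal_mergePercentages : Prop := ∀ (percentageMatrix : List (Int × Int × Bool)) (whole_subset : List Int), Dom_mergePercentages percentageMatrix whole_subset → Spec_mergePercentages percentageMatrix whole_subset (mergePercentages percentageMatrix whole_subset)

-- ===== LEMMAS AND PROOFS =====

-- list-level version of A's inner loop: consumes a suffix of the matrix,
-- returns (remaining suffix, counter, accumulated output)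
def inL : List (Int × Int × Bool) → Int → Int → List Int → List (Int × Int × Bool) × Int × List Int
  | [], _, c, acc => ([], c, acc)
  | r :: rs, t, c, acc =>
    if r.2.2 = false then
      if c + 1 = t then (rs, c + 1, acc ++ [r.2.1])
      else inL rs t (c + 1) acc
    else inL rs t c acc

-- list-level version of A's outer loop
def outA : List Int → List (Int × Int × Bool) → Int → List Int → List Int
  | [], _, _, acc => acc
  | t :: ts, pm, c, acc =>
    let r := inL pm t c acc
    outA ts r.1 r.2.1 r.2.2

-- A's index-based inner loop is the list-level inL on the suffix pm.drop j
theorem mergeInnerA_eq (pm : List (Int × Int × Bool)) :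
    ∀ (n j : Nat), pm.length - j ≤ n → j ≤ pm.length → ∀ (t c : Int) (acc : List Int),
      mergeInnerA pm t j c acc
        = (pm.length - (inL (pm.drop j) t c acc).1.length, (inL (pm.drop j) t c acc).2) ∧
      pm.drop (pm.length - (inL (pm.drop j) t c acc).1.length) = (inL (pm.drop j) t c acc).1 := by
  intro n
  induction n with
  | zero =>
    intro j hn hj t c acc
    have hj' : j = pm.length := by omega
    subst hj'
    rw [List.drop_length]
    rw [mergeInnerA]
    simp [inL]
  | succ n ih =>
    intro j hn hj t c acc
    by_cases h : j < pm.length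
    · have hdrop : pm.drop j = pm[j] :: pm.drop (j + 1) := List.drop_eq_getElem_cons h
      rw [mergeInnerA, dif_pos h, hdrop]
      by_cases hb : pm[j].2.2 = false
      · by_cases ht : c + 1 = t
        · have hlen : (pm.drop (j+1)).length = pm.length - (j+1) := List.length_drop ..
          simp only [inL, if_pos hb, if_pos ht]
          constructor
          · simp only [hlen]
            congr 1
            omega
          · rw [hlen]
            congr 1
            omega
        · simp only [inL, if_pos hb, if_neg ht]
          exact ih (j+1) (by omega) (by omega) t (c+1) acc
      · simp only [inL, if_neg hb]
        exact ih (j+1) (by omega) (by omega) t c acc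
    · have hj' : j = pm.length := by omega
      subst hj'
      rw [List.drop_length]
      rw [mergeInnerA]
      simp [inL]

-- A's outer fold over the thresholds is the list-level outA
theorem foldA_eq (pm : List (Int × Int × Bool)) :
    ∀ (ts : List Int) (j : Nat) (c : Int) (acc : List Int), j ≤ pm.length →
      (ts.foldl (fun st t => mergeInnerA pm t st.1 st.2.1 st.2.2) (j, c, acc)).2.2
        = outA ts (pm.drop j) c acc := by
  intro ts
  induction ts with
  | nil => intro j c acc hj; rfl
  | cons t ts ih =>
    intro j c acc hj
    obtain ⟨heq, hdrop⟩ := mergeInnerA_eq pm (pm.length - j) j le_rfl hj t c acc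
    simp only [List.foldl_cons, outA]
    rw [heq]
    have hle : pm.length - (inL (pm.drop j) t c acc).1.length ≤ pm.length := Nat.sub_le ..
    rw [ih _ _ _ hle, hdrop]

theorem outA_nil_matrix : ∀ (ts : List Int) (c : Int) (acc : List Int), outA ts [] c acc = acc := by
  intro ts
  induction ts with
  | nil => intro c acc; rfl
  | cons t ts ih => intro c acc; simp [outA, inL, ih]

-- B's single pass is the list-level outA on the remaining thresholds
theorem mergeGoB_eq (thr : List Int) :
    ∀ (pm : List (Int × Int × Bool)) (ti : Nat) (c : Int) (out : List Int),
      mergeGoB thr pm ti c out = outA (thr.drop ti) pm c out := by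
  intro pm
  induction pm with
  | nil => intro ti c out; rw [outA_nil_matrix]; rfl
  | cons r rs ih =>
    intro ti c out
    by_cases h : thr.length ≤ ti
    · rw [List.drop_of_length_le h]
      simp only [mergeGoB, if_pos h]
      rfl
    · rw [Nat.not_le] at h
      have hdrop : thr.drop ti = thr[ti] :: thr.drop (ti + 1) := List.drop_eq_getElem_cons h
      have hgetD : thr.getD ti 0 = thr[ti] := List.getD_eq_getElem thr 0 h
      rw [hdrop]
      simp only [mergeGoB, if_neg (by omega : ¬ thr.length ≤ ti), hgetD]
      by_cases hb : r.2.2 = false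
      · by_cases ht : c + 1 = thr[ti]
        · simp only [if_pos hb, if_pos ht, outA, inL]
          rw [ih]
        · simp only [if_pos hb, if_neg ht, outA, inL]
          rw [ih, hdrop]
          rfl
      · simp only [if_neg hb, outA, inL]
        rw [ih, hdrop]
        rfl

-- whole_subset[1:-1] as drop/take
theorem slice_one_neg_one (ws : List Int) :
    PySem.List.slice ws (some 1) (some (-1)) = (ws.drop 1).take (ws.length - 2) := by
  cases ws with
  | nil => rfl
  | cons w rest =>
    simp [PySem.List.slice, PySem.List.clampIdx]
    split_ifs <;> omega

-- A's 'for i in range(1, len(whole_subset) - 1)' with ws[i] is a fold over ws[1:-1]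
theorem foldRange_eq (ws : List Int) (F : (Nat × Int × List Int) → Int → (Nat × Int × List Int))
    (init : Nat × Int × List Int) :
    (PySem.List.pyRange 1 ((ws.length : Int) - 1) 1).foldl
        (fun st i => F st (PySem.List.pyGetD ws i 0)) init
      = ((ws.drop 1).take (ws.length - 2)).foldl F init := by
  cases ws with
  | nil => rfl
  | cons w rest =>
    have hlen : ((w :: rest).length : Int) - 1 = ((w :: rest).dropLast.length : Int) := by
      simp
    rw [hlen]
    rw [PySem.List.foldl_congr_mem (g := fun st i => F st (PySem.List.pyGetD (w :: rest).dropLast i 0))]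
    · rw [PySem.List.foldl_pyRange_pyGetD' ((w :: rest).dropLast) 0 F init (by norm_num : (0:Int) ≤ 1)]
      congr 1
      rw [List.dropLast_eq_take, List.drop_take]
      simp
    · intro acc x hx
      rw [PySem.List.mem_pyRange_one] at hx
      have h1 : (0:Int) ≤ x := by omega
      have h2 : x < ((w :: rest).dropLast.length : Int) := hx.2
      have h2' : x < ((w :: rest).length : Int) := by simp at h2 ⊢; omega
      rw [PySem.List.pyGetD_eq_getElem (w :: rest) 0 h1 h2',
          PySem.List.pyGetD_eq_getElem ((w :: rest).dropLast) 0 h1 h2]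
      rw [List.getElem_dropLast]

-- ===== VERDICT (by name: the statement is the Claim_ definition above) =====
theorem mergePercentages_spec : Claim_equal_mergePercentages := by
  intro pm ws _
  unfold Spec_mergePercentages mergePercentages mergePercentages_alt
  rw [foldRange_eq ws (fun st t => mergeInnerA pm t st.1 st.2.1 st.2.2) (0, 0, [])]
  rw [foldA_eq pm _ 0 0 [] (Nat.zero_le _)]
  rw [slice_one_neg_one, mergeGoB_eq]
  rfl
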